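-- pv_equiv track=rewrite | github.com/felipeymn/t1-otimizacao | tempo.py | list_possibilities
-- ===== SOURCE A (Python) =====
-- def list_possibilities(limit, periods):
--     current_combinations = [[period] for period in periods]
--     possibilities = []
--     aux = []
--     shorter_period = min(periods)
--
--     while current_combinations:
--         for combination in current_combinations:
--             combination_sum = sum(combination)
--             if limit - combination_sum < shorter_period:
--                 # valid combination
--                 possibilities.append(combination)
--             else:
--                 # filter function returns only values greater than the last element in combination
--                 for period in filter(lambda x: x >= combination[-1], periods):
--                     if combination_sum + period <= limit:
--                         aux.append(combination + [period])
--         current_combinations = aux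
--         aux = []
--
--     return possibilities
-- ===== SOURCE B (Python) =====
-- def list_possibilities(limit, periods):
--     # Depth-first backtracking enumeration (prefix-major order), then a stable
--     # regrouping by length to obtain the same length-major order as a BFS.
--     shorter = min(periods)
--     results = []
--
--     def dfs(comb, total):
--         if limit - total < shorter:
--             results.append(comb)
--             return
--         last = comb[-1]
--         for p in periods:
--             if p >= last and total + p <= limit:
--                 dfs(comb + [p], total + p)
--
--     for p in periods:
--         dfs([p], p)
--     results.sort(key=len)
--     return results
-- ===== Notes on version B (the rewrite author's own statement) =====
-- stated objective: alternative
-- what changed: Replaces the level-by-level breadth-first frontier loop (rebuilding aux each round) with a recursive depth-first backtracking enumeration plus one stable sort by length that restores the length-major output order.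
-- outside the precondition, e.g. on list_possibilities(-1, [0]): A returns [[0]], B returns [[0]]
import Mathlib
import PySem

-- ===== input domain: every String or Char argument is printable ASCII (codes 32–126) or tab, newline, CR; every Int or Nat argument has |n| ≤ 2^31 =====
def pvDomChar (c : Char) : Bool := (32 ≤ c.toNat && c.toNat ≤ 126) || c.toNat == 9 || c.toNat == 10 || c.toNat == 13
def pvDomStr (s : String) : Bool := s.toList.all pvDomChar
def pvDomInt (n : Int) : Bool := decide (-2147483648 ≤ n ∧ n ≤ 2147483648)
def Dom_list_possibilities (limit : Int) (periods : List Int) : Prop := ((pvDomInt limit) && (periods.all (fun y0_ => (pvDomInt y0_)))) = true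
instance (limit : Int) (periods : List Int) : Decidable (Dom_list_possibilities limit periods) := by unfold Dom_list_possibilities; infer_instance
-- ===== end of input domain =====

-- B replaces A's breadth-first level loop by depth-first backtracking plus a stable
-- sort by length (alternative decomposition, same results; not claimed faster).


-- ===== PORT A =====
-- the while-loop of A; fuel limit.toNat + 2 always suffices on Pre_ (proved below)
def lpA (limit shorter : Int) (periods : List Int) : Nat → List (List Int) → List (List Int) → List (List Int)
  | 0, _, poss => poss
  | f+1, cs, poss =>
    if cs.isEmpty then poss
    else
      let st := cs.foldl (fun (acc : List (List Int) × List (List Int)) c =>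
        let s := c.sum
        if limit - s < shorter then (acc.1 ++ [c], acc.2)
        else (acc.1, periods.foldl (fun aux p =>
            -- combination[-1]: c is never empty inside the loop, so pyGet? never returns none
            if (PySem.List.pyGet? c (-1)).getD 0 ≤ p then
              (if s + p ≤ limit then aux ++ [c ++ [p]] else aux)
            else aux) acc.2)) (poss, ([] : List (List Int)))
      lpA limit shorter periods f st.2 st.1

def list_possibilities (limit : Int) (periods : List Int) : List (List Int) :=
  match PySem.List.min? periods (fun x => x) with
  | none => []  -- min([]) raises ValueError in Python; excluded by Pre_
  | some shorter => lpA limit shorter periods (limit.toNat + 2) (periods.map (fun p => [p])) []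

-- ===== PORT B =====
-- the recursive dfs of B; fuel limit.toNat + 1 always suffices on Pre_ (proved below)
def dfsB (limit shorter : Int) (periods : List Int) : Nat → List Int → Int → List (List Int)
  | 0, _, _ => []
  | f+1, c, s =>
    if limit - s < shorter then [c]
    else
      periods.foldl (fun acc p =>
        -- comb[-1]: c is never empty here, so pyGet? never returns none
        if (PySem.List.pyGet? c (-1)).getD 0 ≤ p && s + p ≤ limit then
          acc ++ dfsB limit shorter periods f (c ++ [p]) (s + p)
        else acc) []

def list_possibilities_alt (limit : Int) (periods : List Int) : List (List Int) :=
  match PySem.List.min? periods (fun x => x) with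
  | none => []  -- min([]) raises ValueError in Python; excluded by Pre_
  | some shorter =>
    PySem.List.sorted
      (periods.foldl (fun acc p => acc ++ dfsB limit shorter periods (limit.toNat + 1) [p] p) [])
      (fun c => c.length) false

-- ===== PRECONDITION & SPEC =====
-- Pre_ excludes empty periods (min([]) raises ValueError) and any non-positive period:
-- with a period ≤ 0 the frontier sums need not grow, so A's while-loop (and B's recursion)
-- diverges for most limits, though for a few limits A still returns (see claim cites).
def Pre_list_possibilities (limit : Int) (periods : List Int) : Prop :=
  periods ≠ [] ∧ ∀ p ∈ periods, 1 ≤ p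
instance (limit : Int) (periods : List Int) : Decidable (Pre_list_possibilities limit periods) := by unfold Pre_list_possibilities; infer_instance
def pvWitness_list_possibilities : Int × List Int := (5, [2, 3])

def Spec_list_possibilities (limit : Int) (periods : List Int) (out : List (List Int)) : Prop := out = list_possibilities_alt limit periods
instance (limit : Int) (periods : List Int) (out : List (List Int)) : Decidable (Spec_list_possibilities limit periods out) := by unfold Spec_list_possibilities; infer_instance

-- ===== CLAIM (what is proved, stated in full; the proofs are below) =====
def Claim_equal_list_possibilities : Prop := ∀ (limit : Int) (periods : List Int), Dom_list_possibilities limit periods → Pre_list_possibilities limit periods → Spec_list_possibilities limit periods (list_possibilities limit periods)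

-- ===== LEMMAS AND PROOFS =====

-- abstract building blocks shared by the two level/DFS decompositions
def emitB (limit shorter : Int) (c : List Int) : Bool := decide (limit - c.sum < shorter)

def childrenL (limit : Int) (periods : List Int) (c : List Int) : List (List Int) :=
  (periods.filter (fun p =>
    decide ((PySem.List.pyGet? c (-1)).getD 0 ≤ p) && decide (c.sum + p ≤ limit))).map (fun p => c ++ [p])

def nextL (limit shorter : Int) (periods : List Int) (cs : List (List Int)) : List (List Int) :=
  cs.flatMap (fun c => if emitB limit shorter c then [] else childrenL limit periods c)

def iterL (limit shorter : Int) (periods : List Int) : Nat → List (List Int) → List (List Int)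
  | 0, cs => cs
  | k+1, cs => iterL limit shorter periods k (nextL limit shorter periods cs)

def DfsP (limit shorter : Int) (periods : List Int) : Nat → List Int → List (List Int)
  | 0, _ => []
  | f+1, c =>
    if emitB limit shorter c then [c]
    else (childrenL limit periods c).flatMap (DfsP limit shorter periods f)

-- loop shape: conditional extend
theorem foldl_if_append {α β : Type} (q : α → Bool) (g : α → List β) (l : List α) (acc : List β) :
    l.foldl (fun a x => if q x then a ++ g x else a) acc
      = acc ++ l.flatMap (fun x => if q x then g x else []) := by
  have h : (fun (a : List β) (x : α) => if q x then a ++ g x else a)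
      = fun a x => a ++ (if q x then g x else []) := by
    funext a x; by_cases h : q x <;> simp [h]
  rw [h, PySem.List.foldl_append_eq_flatMap]

theorem flatMap_filter_if {α β : Type} (q : α → Bool) (h : α → List β) :
    ∀ l : List α, (l.filter q).flatMap h = l.flatMap (fun x => if q x then h x else []) := by
  intro l; induction l with
  | nil => rfl
  | cons x t ih => by_cases hq : q x <;> simp [List.filter_cons, hq, ih]

theorem flatMap_congr_mem {α β : Type} (l : List α) (f g : α → List β)
    (h : ∀ x ∈ l, f x = g x) : l.flatMap f = l.flatMap g := by
  induction l with
  | nil => rfl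
  | cons x t ih =>
    simp only [List.flatMap_cons]
    rw [h x (by simp), ih (fun y hy => h y (by simp [hy]))]

-- A's inner for-loop builds exactly the children of c
theorem innerA (limit : Int) (periods : List Int) (c : List Int) (acc : List (List Int)) :
    periods.foldl (fun aux p =>
        if (PySem.List.pyGet? c (-1)).getD 0 ≤ p then
          (if c.sum + p ≤ limit then aux ++ [c ++ [p]] else aux)
        else aux) acc
      = acc ++ childrenL limit periods c := by
  have e : (fun (aux : List (List Int)) p =>
      if (PySem.List.pyGet? c (-1)).getD 0 ≤ p then
        (if c.sum + p ≤ limit then aux ++ [c ++ [p]] else aux) else aux)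
      = fun aux p => if decide ((PySem.List.pyGet? c (-1)).getD 0 ≤ p) && decide (c.sum + p ≤ limit)
          then aux ++ [c ++ [p]] else aux := by
    funext aux p
    by_cases h1 : (PySem.List.pyGet? c (-1)).getD 0 ≤ p <;> by_cases h2 : c.sum + p ≤ limit <;>
      simp [h1, h2]
  rw [e, PySem.List.foldl_append_if]
  rfl

-- A's for-loop over one frontier
theorem stepA (limit shorter : Int) (periods : List Int) :
    ∀ (cs : List (List Int)) (poss aux : List (List Int)),
    cs.foldl (fun (acc : List (List Int) × List (List Int)) c =>
        let s := c.sum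
        if limit - s < shorter then (acc.1 ++ [c], acc.2)
        else (acc.1, periods.foldl (fun aux p =>
            if (PySem.List.pyGet? c (-1)).getD 0 ≤ p then
              (if s + p ≤ limit then aux ++ [c ++ [p]] else aux)
            else aux) acc.2)) (poss, aux)
      = (poss ++ cs.filter (emitB limit shorter), aux ++ nextL limit shorter periods cs) := by
  intro cs
  induction cs with
  | nil => intro poss aux; simp [nextL]
  | cons c cs ih =>
    intro poss aux
    by_cases h : limit - c.sum < shorter
    · simp only [List.foldl_cons, if_pos h]
      rw [ih]
      simp [nextL, emitB, h, List.filter_cons]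
    · simp only [List.foldl_cons, if_neg h]
      rw [innerA, ih]
      simp [nextL, emitB, h, List.filter_cons, List.append_assoc]

theorem iterL_nil (limit shorter : Int) (periods : List Int) :
    ∀ k, iterL limit shorter periods k [] = [] := by
  intro k
  induction k with
  | zero => rfl
  | succ k ih =>
    simp only [iterL]
    rw [show nextL limit shorter periods [] = [] from by simp [nextL]]
    exact ih

-- A's while-loop = concatenation of the emitted part of every frontier level
theorem lpA_eq (limit shorter : Int) (periods : List Int) :
    ∀ (f : Nat) (cs poss : List (List Int)),
    lpA limit shorter periods f cs poss
      = poss ++ (List.range f).flatMap (fun k =>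
          (iterL limit shorter periods k cs).filter (emitB limit shorter)) := by
  intro f
  induction f with
  | zero => intro cs poss; simp [lpA]
  | succ f ih =>
    intro cs poss
    by_cases hcs : cs.isEmpty
    · have hnil : cs = [] := List.isEmpty_iff.mp hcs
      subst hnil
      simp [lpA, iterL_nil]
    · simp only [lpA, hcs, Bool.false_eq_true, if_false, if_neg]
      rw [stepA]
      simp only []
      rw [ih]
      rw [List.range_succ_eq_map]
      simp [iterL, List.flatMap_cons, List.flatMap_map, List.append_assoc, Function.comp]

-- B's dfs, called (as B calls it) with s = sum of the combination, is DfsP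
theorem dfsB_eq (limit shorter : Int) (periods : List Int) :
    ∀ (f : Nat) (c : List Int), dfsB limit shorter periods f c c.sum = DfsP limit shorter periods f c := by
  intro f
  induction f with
  | zero => intro c; rfl
  | succ f ih =>
    intro c
    simp only [dfsB, DfsP, emitB]
    by_cases h : limit - c.sum < shorter
    · simp [h]
    · simp only [h, decide_false, if_false, decide_eq_true_eq, if_neg h]
      rw [foldl_if_append]
      have hp : ∀ p : Int, dfsB limit shorter periods f (c ++ [p]) (c.sum + p)
          = DfsP limit shorter periods f (c ++ [p]) := by
        intro p
        have := ih (c ++ [p])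
        simpa [List.sum_append] using this
      simp [childrenL, flatMap_filter_if, List.flatMap_map, hp, Function.comp]

theorem mem_DfsP_len_lb (limit shorter : Int) (periods : List Int) :
    ∀ (f : Nat) (c x : List Int), x ∈ DfsP limit shorter periods f c → c.length ≤ x.length := by
  intro f
  induction f with
  | zero => intro c x hx; simp [DfsP] at hx
  | succ f ih =>
    intro c x hx
    simp only [DfsP] at hx
    by_cases h : emitB limit shorter c
    · rw [if_pos h] at hx
      simp at hx
      subst hx
      exact le_refl _
    · rw [if_neg h] at hx
      obtain ⟨d, hd, hxd⟩ := List.mem_flatMap.mp hx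
      obtain ⟨p, hp, rfl⟩ := List.mem_map.mp hd
      have := ih _ _ hxd
      simp at this
      omega

theorem mem_DfsP_len_ub (limit shorter : Int) (periods : List Int) :
    ∀ (f : Nat) (c x : List Int), x ∈ DfsP limit shorter periods f c → x.length < c.length + f := by
  intro f
  induction f with
  | zero => intro c x hx; simp [DfsP] at hx
  | succ f ih =>
    intro c x hx
    simp only [DfsP] at hx
    by_cases h : emitB limit shorter c
    · rw [if_pos h] at hx
      simp at hx
      subst hx
      omega
    · rw [if_neg h] at hx
      obtain ⟨d, hd, hxd⟩ := List.mem_flatMap.mp hx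
      obtain ⟨p, hp, rfl⟩ := List.mem_map.mp hd
      have := ih _ _ hxd
      simp at this
      omega

theorem iterL_append (limit shorter : Int) (periods : List Int) :
    ∀ (k : Nat) (xs ys : List (List Int)),
    iterL limit shorter periods k (xs ++ ys)
      = iterL limit shorter periods k xs ++ iterL limit shorter periods k ys := by
  intro k
  induction k with
  | zero => intro xs ys; rfl
  | succ k ih =>
    intro xs ys
    simp only [iterL]
    rw [show nextL limit shorter periods (xs ++ ys)
        = nextL limit shorter periods xs ++ nextL limit shorter periods ys from by
      simp [nextL]]
    exact ih _ _

theorem flatMap_iter_singleton (limit shorter : Int) (periods : List Int) (k : Nat) :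
    ∀ (ds : List (List Int)),
    ds.flatMap (fun d => (iterL limit shorter periods k [d]).filter (emitB limit shorter))
      = (iterL limit shorter periods k ds).filter (emitB limit shorter) := by
  intro ds
  induction ds with
  | nil => simp [iterL_nil]
  | cons d ds ih =>
    rw [List.flatMap_cons, ih,
      show d :: ds = [d] ++ ds from rfl, iterL_append, List.filter_append]

-- KEY: the elements of length m of the DFS output from c are the emitted part of level m - |c|
theorem key_filter (limit shorter : Int) (periods : List Int) :
    ∀ (f : Nat) (c : List Int) (m : Nat), c.length ≤ m → m < c.length + f →
    (DfsP limit shorter periods f c).filter (fun x => decide (x.length = m))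
      = (iterL limit shorter periods (m - c.length) [c]).filter (emitB limit shorter) := by
  intro f
  induction f with
  | zero => intro c m h1 h2; omega
  | succ f ih =>
    intro c m h1 h2
    simp only [DfsP]
    by_cases he : emitB limit shorter c
    · rw [if_pos he]
      rcases Nat.eq_or_lt_of_le h1 with heq | hlt
      · have h0 : m - c.length = 0 := by omega
        rw [h0]
        simp [iterL, List.filter_cons, he, heq]
      · obtain ⟨t, ht⟩ : ∃ t, m - c.length = t + 1 := ⟨m - c.length - 1, by omega⟩
        rw [ht]
        simp only [iterL]
        rw [show nextL limit shorter periods [c] = [] from by simp [nextL, he], iterL_nil]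
        simp [List.filter_cons, show ¬ c.length = m by omega]
    · rw [if_neg he]
      rcases Nat.eq_or_lt_of_le h1 with heq | hlt
      · have h0 : m - c.length = 0 := by omega
        rw [h0, List.filter_flatMap]
        rw [List.flatMap_eq_nil_iff.mpr ?_]
        · simp [iterL, List.filter_cons, he]
        · intro d hd
          obtain ⟨p, hp, rfl⟩ := List.mem_map.mp hd
          apply List.filter_eq_nil_iff.mpr
          intro x hx
          have := mem_DfsP_len_lb limit shorter periods f _ x hx
          simp only [List.length_append, List.length_cons, List.length_nil] at this
          simp only [decide_eq_true_eq]
          omega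
      · obtain ⟨t, ht⟩ : ∃ t, m - c.length = t + 1 := ⟨m - c.length - 1, by omega⟩
        rw [ht, List.filter_flatMap]
        have hch : ∀ d ∈ childrenL limit periods c,
            (DfsP limit shorter periods f d).filter (fun x => decide (x.length = m))
              = (iterL limit shorter periods t [d]).filter (emitB limit shorter) := by
          intro d hd
          obtain ⟨p, hp, rfl⟩ := List.mem_map.mp hd
          have hlen : (c ++ [p]).length = c.length + 1 := by simp
          have := ih (c ++ [p]) m (by omega) (by omega)
          rw [this, show m - (c ++ [p]).length = t from by simp; omega]
        rw [flatMap_congr_mem _ _ _ hch, flatMap_iter_singleton]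
        simp only [iterL]
        rw [show nextL limit shorter periods [c] = childrenL limit periods c from by
          simp [nextL, he]]

theorem mem_iterL_len (limit shorter : Int) (periods : List Int) :
    ∀ (k : Nat) (cs : List (List Int)) (n : Nat) (x : List Int),
    (∀ c ∈ cs, c.length = n) → x ∈ iterL limit shorter periods k cs → x.length = n + k := by
  intro k
  induction k with
  | zero => intro cs n x h hx; simpa using h x hx
  | succ k ih =>
    intro cs n x h hx
    simp only [iterL] at hx
    have h' : ∀ c' ∈ nextL limit shorter periods cs, c'.length = n + 1 := by
      intro c' hc'
      obtain ⟨c, hc, hcc⟩ := List.mem_flatMap.mp hc'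
      by_cases he : emitB limit shorter c
      · simp [he] at hcc
      · simp only [if_neg he] at hcc
        obtain ⟨p, hp, rfl⟩ := List.mem_map.mp hcc
        simp [h c hc]
    have := ih _ _ _ h' hx
    omega

theorem sum_ge_len : ∀ (c : List Int), (∀ y ∈ c, 1 ≤ y) → (c.length : Int) ≤ c.sum := by
  intro c
  induction c with
  | nil => simp
  | cons y t ih =>
    intro h
    have h1 := h y (by simp)
    have h2 := ih (fun z hz => h z (by simp [hz]))
    simp only [List.sum_cons, List.length_cons]
    push_cast
    omega

theorem mem_nextL_sum (limit shorter : Int) (periods : List Int) (cs : List (List Int)) (x : List Int)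
    (hx : x ∈ nextL limit shorter periods cs) : x.sum ≤ limit := by
  obtain ⟨c, hc, hxc⟩ := List.mem_flatMap.mp hx
  by_cases he : emitB limit shorter c
  · simp [he] at hxc
  · simp only [if_neg he] at hxc
    obtain ⟨p, hp, rfl⟩ := List.mem_map.mp hxc
    have := List.of_mem_filter hp
    simp only [Bool.and_eq_true, decide_eq_true_eq] at this
    simp only [List.sum_append, List.sum_cons, List.sum_nil]
    omega

theorem mem_iterL_sum (limit shorter : Int) (periods : List Int) :
    ∀ (k : Nat) (cs : List (List Int)) (x : List Int), (∀ c ∈ cs, c.sum ≤ limit) →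
    x ∈ iterL limit shorter periods k cs → x.sum ≤ limit := by
  intro k
  induction k with
  | zero => intro cs x h hx; exact h x hx
  | succ k ih =>
    intro cs x h hx
    simp only [iterL] at hx
    exact ih _ _ (fun c hc => mem_nextL_sum limit shorter periods cs c hc) hx

theorem mem_iterL_elems (limit shorter : Int) (periods : List Int) (hper : ∀ p ∈ periods, (1:Int) ≤ p) :
    ∀ (k : Nat) (cs : List (List Int)) (x : List Int), (∀ c ∈ cs, ∀ y ∈ c, (1:Int) ≤ y) →
    x ∈ iterL limit shorter periods k cs → ∀ y ∈ x, (1:Int) ≤ y := by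
  intro k
  induction k with
  | zero => intro cs x h hx; exact h x hx
  | succ k ih =>
    intro cs x h hx
    simp only [iterL] at hx
    refine ih _ _ ?_ hx
    intro c' hc' y hy
    obtain ⟨c, hc, hcc⟩ := List.mem_flatMap.mp hc'
    by_cases he : emitB limit shorter c
    · simp [he] at hcc
    · simp only [if_neg he] at hcc
      obtain ⟨p, hp, rfl⟩ := List.mem_map.mp hcc
      rcases List.mem_append.mp hy with hy | hy
      · exact h c hc y hy
      · have hpm := List.mem_of_mem_filter hp
        simp only [List.mem_singleton] at hy
        subst hy
        exact hper _ hpm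

-- under Pre_, the frontier is empty from level limit.toNat on
theorem iterL_big_nil (limit shorter : Int) (periods : List Int) (hper : ∀ p ∈ periods, (1:Int) ≤ p) :
    ∀ (k : Nat), 1 ≤ k → limit.toNat ≤ k →
    iterL limit shorter periods k (periods.map (fun p => [p])) = [] := by
  intro k h1 hk
  rw [List.eq_nil_iff_forall_not_mem]
  intro x hx
  have hlen : x.length = 1 + k :=
    mem_iterL_len limit shorter periods k _ 1 x
      (by intro c hc; obtain ⟨p, _, rfl⟩ := List.mem_map.mp hc; rfl) hx
  have helems : ∀ y ∈ x, (1:Int) ≤ y :=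
    mem_iterL_elems limit shorter periods hper k _ x
      (by
        intro c hc y hy
        obtain ⟨p, hp, rfl⟩ := List.mem_map.mp hc
        simp only [List.mem_singleton] at hy
        subst hy
        exact hper _ hp) hx
  have hsum : x.sum ≤ limit := by
    obtain ⟨k', rfl⟩ : ∃ k', k = k' + 1 := ⟨k - 1, by omega⟩
    simp only [iterL] at hx
    exact mem_iterL_sum limit shorter periods k' _ x
      (fun c hc => mem_nextL_sum limit shorter periods _ c hc) hx
  have hge := sum_ge_len x helems
  have h2 : limit ≤ (limit.toNat : Int) := Int.self_le_toNat limit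
  have h3 : (limit.toNat : Int) ≤ (k : Int) := by exact_mod_cast hk
  rw [hlen] at hge
  push_cast at hge
  omega

-- stability of insertion into a key-sorted list
theorem insertBy_filter {α : Type} (key : α → Nat) (x : α) (m : Nat) :
    ∀ (ys : List α), ys.Pairwise (fun a b => key a ≤ key b) →
    (PySem.List.insertBy (fun a b => decide (key a < key b)) x ys).filter (fun a => decide (key a = m))
      = ys.filter (fun a => decide (key a = m)) ++ (if key x = m then [x] else []) := by
  intro ys
  induction ys with
  | nil =>
    intro _
    by_cases h : key x = m <;> simp [PySem.List.insertBy, List.filter, h]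
  | cons y t ih =>
    intro hp
    obtain ⟨hy, ht⟩ := List.pairwise_cons.mp hp
    by_cases hb : key x < key y
    · simp only [PySem.List.insertBy, hb, decide_true, if_true]
      by_cases hm : key x = m
      · have hnil : (y :: t).filter (fun a => decide (key a = m)) = [] := by
          apply List.filter_eq_nil_iff.mpr
          intro a ha
          simp only [decide_eq_true_eq]
          rcases List.mem_cons.mp ha with rfl | ha
          · omega
          · have := hy a ha
            omega
        simp [List.filter_cons, hm, hnil]
      · simp [List.filter_cons, hm]
    · simp only [PySem.List.insertBy, hb, decide_false, Bool.false_eq_true, if_false]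
      rw [List.filter_cons, List.filter_cons]
      by_cases hym : key y = m <;> simp [hym, ih ht, List.append_assoc]

-- PySem's sorted is stable: it preserves each per-key fibre
theorem sorted_filter_key {α : Type} (key : α → Nat) (m : Nat) :
    ∀ (xs : List α),
    (PySem.List.sorted xs key false).filter (fun a => decide (key a = m))
      = xs.filter (fun a => decide (key a = m)) := by
  intro xs
  induction xs using List.reverseRecOn with
  | nil => rfl
  | append_singleton xs x ih =>
    rw [PySem.List.sorted_eq_foldl_insertBy, List.foldl_append, List.foldl_cons, List.foldl_nil,
      ← PySem.List.sorted_eq_foldl_insertBy,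
      insertBy_filter key x m _ (PySem.List.sorted_pairwise xs key), ih, List.filter_append]
    by_cases h : key x = m <;> simp [List.filter_cons, h]

-- a key-nondecreasing list is determined by its per-key fibres
theorem stable_unique {α : Type} (key : α → Nat) :
    ∀ (L1 L2 : List α), L1.Pairwise (fun a b => key a ≤ key b) → L2.Pairwise (fun a b => key a ≤ key b) →
    (∀ m, L1.filter (fun a => decide (key a = m)) = L2.filter (fun a => decide (key a = m))) →
    L1 = L2 := by
  intro L1
  induction L1 with
  | nil =>
    intro L2 _ _ hf
    cases L2 with
    | nil => rfl
    | cons y t2 =>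
      have := hf (key y)
      simp [List.filter_cons] at this
  | cons x t1 ih =>
    intro L2 h1 h2 hf
    cases L2 with
    | nil =>
      have := hf (key x)
      simp [List.filter_cons] at this
    | cons y t2 =>
      obtain ⟨hx1, ht1⟩ := List.pairwise_cons.mp h1
      obtain ⟨hy2, ht2⟩ := List.pairwise_cons.mp h2
      have hxin : x ∈ y :: t2 := by
        have hfx := hf (key x)
        have hx : x ∈ (x :: t1).filter (fun a => decide (key a = key x)) :=
          List.mem_filter.mpr ⟨by simp, by simp⟩
        rw [hfx] at hx
        exact List.mem_of_mem_filter hx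
      have hyin : y ∈ x :: t1 := by
        have hfy := (hf (key y)).symm
        have hy : y ∈ (y :: t2).filter (fun a => decide (key a = key y)) :=
          List.mem_filter.mpr ⟨by simp, by simp⟩
        rw [hfy] at hy
        exact List.mem_of_mem_filter hy
      have hxy : key x = key y := by
        have h1' : key x ≤ key y := by
          rcases List.mem_cons.mp hyin with h | h
          · rw [h]
          · exact hx1 y h
        have h2' : key y ≤ key x := by
          rcases List.mem_cons.mp hxin with h | h
          · rw [h]
          · exact hy2 x h
        omega
      have hhead := hf (key x)
      rw [List.filter_cons, List.filter_cons] at hhead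
      simp only [decide_eq_true_eq, hxy, if_pos rfl] at hhead
      obtain ⟨rfl, htl⟩ := List.cons_eq_cons.mp hhead
      have hfil : ∀ m, t1.filter (fun a => decide (key a = m)) = t2.filter (fun a => decide (key a = m)) := by
        intro m
        by_cases hm : m = key x
        · subst hm; exact htl
        · have hfm := hf m
          rw [List.filter_cons, List.filter_cons] at hfm
          have hd : decide (key x = m) = false := by
            simp only [decide_eq_false_iff_not]
            omega
          rw [hd] at hfm
          simpa using hfm
      rw [ih t2 ht1 ht2 hfil]

theorem flatMap_range_nil {α : Type} (g : Nat → List α) :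
    ∀ (f : Nat), (∀ k, k < f → g k = []) → (List.range f).flatMap g = [] := by
  intro f
  induction f with
  | zero => intro _; rfl
  | succ f ih =>
    intro h
    rw [List.range_succ, List.flatMap_append, ih (fun k hk => h k (by omega))]
    simp [h f (by omega)]

theorem flatMap_range_single {α : Type} (g : Nat → List α) :
    ∀ (f j : Nat), j < f → (∀ k, k < f → k ≠ j → g k = []) →
    (List.range f).flatMap g = g j := by
  intro f
  induction f with
  | zero => intro j hj _; omega
  | succ f ih =>
    intro j hj h
    rw [List.range_succ, List.flatMap_append]
    by_cases hjf : j = f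
    · subst hjf
      rw [flatMap_range_nil g j (fun k hk => h k (by omega) (by omega))]
      simp
    · rw [ih j (by omega) (fun k hk hkj => h k (by omega) hkj)]
      simp [h f (by omega) (Ne.symm hjf)]

-- the level output is nondecreasing in length
theorem levels_pairwise (limit shorter : Int) (periods : List Int) (f : Nat) :
    ((List.range f).flatMap (fun k =>
      (iterL limit shorter periods k (periods.map (fun p => [p]))).filter (emitB limit shorter))).Pairwise
      (fun a b => a.length ≤ b.length) := by
  have hcs0 : ∀ c ∈ periods.map (fun p => [p]), c.length = 1 := by
    intro c hc
    obtain ⟨p, _, rfl⟩ := List.mem_map.mp hc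
    rfl
  have hblock : ∀ k, ∀ x ∈ (iterL limit shorter periods k (periods.map (fun p => [p]))).filter
      (emitB limit shorter), x.length = 1 + k := by
    intro k x hx
    exact mem_iterL_len limit shorter periods k _ 1 x hcs0 (List.mem_of_mem_filter hx)
  rw [List.flatMap_def]
  apply List.pairwise_flatten.mpr
  constructor
  · intro l hl
    obtain ⟨k, _, rfl⟩ := List.mem_map.mp hl
    apply List.pairwise_of_forall_mem_list
    intro a ha b hb
    rw [hblock k a ha, hblock k b hb]
  · apply List.pairwise_map.mpr
    apply List.Pairwise.imp ?_ (List.pairwise_lt_range (n := f))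
    intro a b hab
    intro x hx y hy
    rw [hblock a x hx, hblock b y hy]
    omega

-- ===== VERDICT (by name: the statement is the Claim_ definition above) =====
theorem list_possibilities_spec : Claim_equal_list_possibilities := by
  intro limit periods _ hpre
  obtain ⟨hne, hpos⟩ := hpre
  unfold Spec_list_possibilities list_possibilities list_possibilities_alt
  cases hmin : PySem.List.min? periods (fun x => x) with
  | none => exact absurd (((PySem.List.min?_eq_none_iff periods (fun x => x)).mp hmin)) hne
  | some sh =>
    simp only []
    rw [PySem.List.foldl_append_eq_flatMap]
    simp only [List.nil_append]
    have hdfs : periods.flatMap (fun p => dfsB limit sh periods (limit.toNat + 1) [p] p)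
        = periods.flatMap (fun p => DfsP limit sh periods (limit.toNat + 1) [p]) := by
      apply flatMap_congr_mem
      intro p _
      have := dfsB_eq limit sh periods (limit.toNat + 1) [p]
      simpa using this
    rw [hdfs, lpA_eq]
    simp only [List.nil_append]
    have hcs0 : ∀ c ∈ periods.map (fun p : Int => [p]), c.length = 1 := by
      intro c hc
      obtain ⟨p, _, rfl⟩ := List.mem_map.mp hc
      rfl
    apply stable_unique (fun c : List Int => c.length)
    · exact levels_pairwise limit sh periods _
    · exact PySem.List.sorted_pairwise _ _
    · intro m
      rw [sorted_filter_key]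
      by_cases hm : 1 ≤ m ∧ m ≤ limit.toNat + 1
      · obtain ⟨hm1, hm2⟩ := hm
        have hDp : ∀ p ∈ periods, (DfsP limit sh periods (limit.toNat + 1) [p]).filter
            (fun x => decide (x.length = m))
            = (iterL limit sh periods (m - 1) [[p]]).filter (emitB limit sh) := by
          intro p _
          have := key_filter limit sh periods (limit.toNat + 1) [p] m (by simp; omega)
            (by simp; omega)
          simpa using this
        rw [List.filter_flatMap, List.filter_flatMap, flatMap_congr_mem _ _ _ hDp]
        rw [show periods.flatMap (fun p => (iterL limit sh periods (m - 1) [[p]]).filter (emitB limit sh))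
            = (periods.map (fun p : Int => [p])).flatMap
                (fun d => (iterL limit sh periods (m - 1) [d]).filter (emitB limit sh)) from by
          rw [List.flatMap_map]]
        rw [flatMap_iter_singleton]
        rw [flatMap_range_single _ _ (m - 1) (by omega) ?_]
        · apply List.filter_eq_self.mpr
          intro x hx
          have := mem_iterL_len limit sh periods (m - 1) _ 1 x hcs0 (List.mem_of_mem_filter hx)
          simp only [decide_eq_true_eq]
          omega
        · intro k hk hkm
          apply List.filter_eq_nil_iff.mpr
          intro x hx
          have := mem_iterL_len limit sh periods k _ 1 x hcs0 (List.mem_of_mem_filter hx)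
          simp only [decide_eq_true_eq]
          omega
      · rw [List.filter_flatMap, List.filter_flatMap]
        rw [flatMap_range_nil, List.flatMap_eq_nil_iff.mpr ?_]
        · intro p hp
          apply List.filter_eq_nil_iff.mpr
          intro x hx
          have hlb := mem_DfsP_len_lb limit sh periods _ _ x hx
          have hub := mem_DfsP_len_ub limit sh periods _ _ x hx
          simp only [List.length_cons, List.length_nil] at hlb hub
          simp only [decide_eq_true_eq]
          omega
        · intro k hk
          by_cases hkbig : limit.toNat ≤ k ∧ 1 ≤ k
          · rw [iterL_big_nil limit sh periods hpos k hkbig.2 hkbig.1]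
            rfl
          · apply List.filter_eq_nil_iff.mpr
            intro x hx
            have := mem_iterL_len limit sh periods k _ 1 x hcs0 (List.mem_of_mem_filter hx)
            simp only [decide_eq_true_eq]
            omega
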